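-- pv_equiv track=rewrite | github.com/kunaldeo/code-qna | src/code_qna/context/relevance_scorer.py | group_results_by_file
-- ===== SOURCE A (Python) =====
-- from typing import Dict, List, Set, Tuple
--
-- def group_results_by_file(results: List[Dict[str, any]]) -> Dict[str, List[Dict[str, any]]]:
--     """Group search results by file."""
--     grouped = {}
--     for result in results:
--         file_path = result.get("file", "")
--         if file_path not in grouped:
--             grouped[file_path] = []
--         grouped[file_path].append(result)
--     return grouped
-- ===== SOURCE B (Python) =====
-- def group_results_by_file(results):
--     """Group search results by file."""
--     keys = list(dict.fromkeys(r.get("file", "") for r in results))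
--     return {k: [r for r in results if r.get("file", "") == k] for k in keys}
-- ===== Notes on version B (the rewrite author's own statement) =====
-- stated objective: alternative
-- what changed: Replaces the single mutate-a-dict-of-lists loop by a two-pass comprehension: first an ordered dedup of the file keys (dict.fromkeys), then one filter pass per key building the whole dict in a comprehension.
import Mathlib
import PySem

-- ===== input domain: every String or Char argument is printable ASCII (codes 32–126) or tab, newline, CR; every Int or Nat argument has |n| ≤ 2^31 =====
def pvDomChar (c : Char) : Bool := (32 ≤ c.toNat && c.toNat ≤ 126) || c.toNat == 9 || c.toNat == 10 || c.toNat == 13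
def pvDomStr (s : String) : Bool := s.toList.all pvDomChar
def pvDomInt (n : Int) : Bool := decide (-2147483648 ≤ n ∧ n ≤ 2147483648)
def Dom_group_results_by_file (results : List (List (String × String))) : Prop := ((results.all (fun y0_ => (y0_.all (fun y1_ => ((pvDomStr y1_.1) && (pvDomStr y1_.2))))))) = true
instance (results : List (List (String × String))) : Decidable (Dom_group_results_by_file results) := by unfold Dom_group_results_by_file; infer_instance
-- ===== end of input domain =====

-- B groups by a two-pass comprehension (ordered key dedup, then one filter per key) instead of A's
-- single mutate-a-dict-of-lists loop; same result, objective: alternative decomposition.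

-- result.get("file", "")  (shared key extraction, identical in both Pythons)
def pyFileGet (r : List (String × String)) : String :=
  PySem.Dict.getD (PySem.Dict.ofList r) "file" ""

-- ===== PORT A =====
-- loop body: if file_path not in grouped: grouped[file_path] = []; grouped[file_path].append(result)
-- (the append to the now-present key is exactly Dict.modify with default [])
def stepA (grouped : PySem.Dict String (List (List (String × String))))
    (result : List (String × String)) : PySem.Dict String (List (List (String × String))) :=
  let fp := pyFileGet result
  let grouped := if ¬ (grouped.contains fp) then grouped.insert fp [] else grouped
  grouped.modify fp [] (fun l => l ++ [result])

def group_results_by_file (results : List (List (String × String))) : List (String × List (List (String × String))) :=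
  (results.foldl stepA PySem.Dict.empty).items

-- ===== PORT B =====
def group_results_by_file_alt (results : List (List (String × String))) : List (String × List (List (String × String))) :=
  (PySem.List.dedup (results.map pyFileGet)).map
    (fun k => (k, results.filter (fun r => pyFileGet r == k)))

-- ===== PRECONDITION & SPEC =====
def Spec_group_results_by_file (results : List (List (String × String))) (out : List (String × List (List (String × String)))) : Prop := out = group_results_by_file_alt results
instance (results : List (List (String × String))) (out : List (String × List (List (String × String)))) : Decidable (Spec_group_results_by_file results out) := by unfold Spec_group_results_by_file; infer_instance

-- ===== CLAIM (what is proved, stated in full; the proofs are below) =====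
def Claim_equal_group_results_by_file : Prop := ∀ (results : List (List (String × String))), Dom_group_results_by_file results → Spec_group_results_by_file results (group_results_by_file results)

-- ===== LEMMAS AND PROOFS =====

theorem keys_stepA (d : PySem.Dict String (List (List (String × String)))) (r : List (String × String)) :
    (stepA d r).keys = PySem.Set.add d.keys (pyFileGet r) := by
  simp only [stepA, PySem.Dict.modify]
  by_cases h : d.contains (pyFileGet r) = true
  · rw [if_neg (by simp [h]), PySem.Dict.keys_insert_of_contains d _ h,
      PySem.Set.add_of_mem ((PySem.Dict.contains_iff_mem_keys d (pyFileGet r)).mp h)]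
  · have hnm : pyFileGet r ∉ d.keys := fun hm =>
      h ((PySem.Dict.contains_iff_mem_keys d (pyFileGet r)).mpr hm)
    rw [if_pos (by simp [h]),
      PySem.Dict.keys_insert_of_contains _ _ (PySem.Dict.contains_insert_self d _ _),
      PySem.Dict.keys_insert_of_not_contains d _ (by simpa using h),
      PySem.Set.add_of_not_mem hnm]

theorem keys_foldl_stepA (l : List (List (String × String)))
    (d : PySem.Dict String (List (List (String × String)))) :
    (l.foldl stepA d).keys = PySem.Set.update d.keys (l.map pyFileGet) := by
  induction l generalizing d with
  | nil => simp [PySem.Set.update_nil]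
  | cons r l ih => simp [List.foldl_cons, ih, keys_stepA, PySem.Set.update_cons]

theorem nodup_keys_foldl_stepA (l : List (List (String × String)))
    (d : PySem.Dict String (List (List (String × String)))) (h : d.keys.Nodup) :
    (l.foldl stepA d).keys.Nodup := by
  rw [keys_foldl_stepA]; exact PySem.Set.nodup_update _ _ h

theorem getD_stepA (d : PySem.Dict String (List (List (String × String))))
    (r : List (String × String)) (c : String) :
    (stepA d r).getD c [] = if c = pyFileGet r then d.getD c [] ++ [r] else d.getD c [] := by
  simp only [stepA, PySem.Dict.modify]
  by_cases h : d.contains (pyFileGet r) = true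
  · rw [if_neg (by simp [h]), PySem.Dict.getD_insert]
    split_ifs with hc
    · rw [hc]
    · rfl
  · rw [if_pos (by simp [h]), PySem.Dict.getD_insert]
    split_ifs with hc
    · rw [hc, PySem.Dict.getD_insert_self, PySem.Dict.getD_of_not_contains d _ (by simpa using h)]
    · exact PySem.Dict.getD_insert_of_ne d _ _ hc

theorem getD_foldl_stepA (l : List (List (String × String)))
    (d : PySem.Dict String (List (List (String × String)))) (c : String) :
    (l.foldl stepA d).getD c [] = d.getD c [] ++ l.filter (fun r => pyFileGet r == c) := by
  induction l generalizing d with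
  | nil => simp
  | cons r l ih =>
    rw [List.foldl_cons, ih, getD_stepA, List.filter_cons]
    by_cases hc : c = pyFileGet r
    · simp [hc.symm, List.append_assoc]
    · have : (pyFileGet r == c) = false := by simpa using Ne.symm hc
      simp [hc, this]

-- ===== VERDICT (by name: the statement is the Claim_ definition above) =====
theorem group_results_by_file_spec : Claim_equal_group_results_by_file := by
  intro results _
  show group_results_by_file results = group_results_by_file_alt results
  unfold group_results_by_file group_results_by_file_alt
  set d := results.foldl stepA PySem.Dict.empty with hd
  have hn : d.keys.Nodup := nodup_keys_foldl_stepA _ _ (by simp)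
  rw [PySem.Dict.items_eq_map_keys d hn ([] : List (List (String × String)))]
  have hk : d.keys = PySem.List.dedup (results.map pyFileGet) := by
    rw [hd, keys_foldl_stepA]
    show PySem.Set.update PySem.Set.empty _ = _
    rw [PySem.Set.update_empty, PySem.List.dedup_eq_ofList]
  rw [hk]
  apply List.map_congr_left
  intro k _
  have := getD_foldl_stepA results PySem.Dict.empty k
  rw [← hd] at this
  simp [this]
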